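-- pv_equiv track=rewrite | github.com/ManuelGurbanov/facu | py.py | reemplazar_pares
-- ===== SOURCE A (Python) =====
-- def reemplazar_pares(lista):
--     nueva_lista = []
--     i = 0
--     while i< len(lista):
--         if (i%2==0):
--             nueva_lista.append("0")
--         else:
--             nueva_lista.append(lista[i])
--         i +=1;
--     return nueva_lista;
-- ===== SOURCE B (Python) =====
-- def reemplazar_pares(lista):
--     nueva = list(lista)
--     nueva[::2] = ["0"] * ((len(lista) + 1) // 2)
--     return nueva
-- ===== Notes on version B (the rewrite author's own statement) =====
-- stated objective: idiomatic
-- what changed: B copies the list and overwrites all even-indexed positions at once with a strided slice assignment of ((len+1)//2) '0'-strings, instead of A's index-by-index while loop with an i%2 parity branch.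
import Mathlib
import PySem

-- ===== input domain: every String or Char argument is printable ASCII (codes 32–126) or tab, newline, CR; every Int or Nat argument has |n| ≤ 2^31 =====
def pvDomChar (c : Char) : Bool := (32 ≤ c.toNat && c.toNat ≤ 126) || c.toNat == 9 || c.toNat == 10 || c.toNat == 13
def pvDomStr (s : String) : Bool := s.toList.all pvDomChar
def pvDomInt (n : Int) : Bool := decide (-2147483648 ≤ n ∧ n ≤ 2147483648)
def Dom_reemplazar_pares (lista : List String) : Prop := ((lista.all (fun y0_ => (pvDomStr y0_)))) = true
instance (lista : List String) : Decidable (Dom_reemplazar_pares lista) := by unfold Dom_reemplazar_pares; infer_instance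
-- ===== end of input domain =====

-- B replaces A's index-by-index while loop (parity branch) with a copy plus a
-- strided slice assignment over the even positions (idiomatic; same cost).

-- ===== PORT A =====
-- A's while loop: i runs from 0 to len-1, appending "0" on even i, lista[i] on odd i.
def pvA_loop (lista : List String) (i : Nat) (acc : List String) : List String :=
  if i < lista.length then
    pvA_loop lista (i + 1)
      (acc ++ [if i % 2 == 0 then "0" else (PySem.List.pyGet? lista (i : Int)).getD ""])
  else acc
termination_by lista.length - i

def reemplazar_pares (lista : List String) : List String :=
  pvA_loop lista 0 []

-- ===== PORT B =====
-- nueva[::2] = repl : write repl's elements into positions 0,2,4,… of nueva.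
def pvSetEvery2 (nueva repl : List String) : List String :=
  match nueva, repl with
  | [], _ => []
  | x :: rest, [] => x :: rest
  | _ :: rest, r :: rs =>
    match rest with
    | [] => [r]
    | y :: rest2 => r :: y :: pvSetEvery2 rest2 rs

def reemplazar_pares_alt (lista : List String) : List String :=
  let nueva := lista
  pvSetEvery2 nueva (List.replicate ((lista.length + 1) / 2) "0")

-- ===== PRECONDITION & SPEC =====
def Spec_reemplazar_pares (lista : List String) (out : List String) : Prop := out = reemplazar_pares_alt lista
instance (lista : List String) (out : List String) : Decidable (Spec_reemplazar_pares lista out) := by unfold Spec_reemplazar_pares; infer_instance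

-- ===== CLAIM (what is proved, stated in full; the proofs are below) =====
def Claim_equal_reemplazar_pares : Prop := ∀ (lista : List String), Dom_reemplazar_pares lista → Spec_reemplazar_pares lista (reemplazar_pares lista)

-- ===== LEMMAS AND PROOFS =====

-- common reference: replace each element whose (global) parity flag is true by "0"
def pvSpecP : List String → Bool → List String
  | [], _ => []
  | x :: rest, b => (if b then "0" else x) :: pvSpecP rest (!b)

theorem pvA_loop_eq (lista : List String) (i : Nat) (acc : List String) :
    pvA_loop lista i acc = acc ++ pvSpecP (lista.drop i) (i % 2 == 0) := by
  by_cases h : i < lista.length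
  · rw [pvA_loop]
    simp only [h, if_pos]
    rw [pvA_loop_eq lista (i + 1)]
    have hd : lista.drop i = lista[i] :: lista.drop (i + 1) :=
      List.drop_eq_getElem_cons h
    have hg : (PySem.List.pyGet? lista (i : Int)).getD "" = lista[i] := by
      simp [PySem.List.pyGet?_natCast, List.getElem?_eq_getElem h]
    have hp : ((i + 1) % 2 == 0) = !(i % 2 == 0) := by
      rcases Nat.mod_two_eq_zero_or_one i with hm | hm <;>
        · have h2 : (i + 1) % 2 = (i % 2 + 1) % 2 := by omega
          rw [h2, hm]; rfl
    rw [hd, hg, hp]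
    simp [pvSpecP]
  · rw [pvA_loop]
    simp [h, List.drop_of_length_le (Nat.le_of_not_lt h), pvSpecP]
termination_by lista.length - i

theorem pvB_eq (xs : List String) :
    pvSetEvery2 xs (List.replicate ((xs.length + 1) / 2) "0") = pvSpecP xs true := by
  match xs with
  | [] => rfl
  | [a] => simp [pvSetEvery2, pvSpecP]
  | a :: b :: rest =>
    have hc : (((a :: b :: rest).length + 1) / 2) = (rest.length + 1) / 2 + 1 := by
      simp [List.length]; omega
    rw [hc, List.replicate_succ]
    show ("0" : String) :: b :: pvSetEvery2 rest (List.replicate ((rest.length + 1) / 2) "0")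
        = pvSpecP (a :: b :: rest) true
    rw [pvB_eq rest]
    simp [pvSpecP]

-- ===== VERDICT (by name: the statement is the Claim_ definition above) =====
theorem reemplazar_pares_spec : Claim_equal_reemplazar_pares := by
  intro lista _
  show reemplazar_pares lista = reemplazar_pares_alt lista
  rw [reemplazar_pares, pvA_loop_eq, reemplazar_pares_alt]
  simp [pvB_eq]
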